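-- pv_equiv track=rewrite | github.com/BochDu/pigchat | pigchat.py | extract_three_chars_from_right
-- ===== SOURCE A (Python) =====
-- def extract_three_chars_from_right(input_str):
--     unique_chars = []
--     for char in input_str[::-1]:  # 从右到左遍历字符串
--         if char not in unique_chars:
--             unique_chars.append(char)
--
--         if len(unique_chars) == 3:
--             break
--
--     return ''.join(unique_chars)
-- ===== SOURCE B (Python) =====
-- def extract_three_chars_from_right(input_str):
--     # Record the last-occurrence index of every character in one forward pass,
--     # then sort characters by recency (most recent first) and keep the top 3.
--     last_index = {}
--     for i, ch in enumerate(input_str):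
--         last_index[ch] = i
--     top = sorted(last_index.items(), key=lambda kv: kv[1], reverse=True)[:3]
--     return ''.join(ch for ch, _ in top)
-- ===== Notes on version B (the rewrite author's own statement) =====
-- stated objective: alternative
-- what changed: Instead of scanning the reversed string and collecting unseen characters with an early break, B makes one forward pass recording each character's last-occurrence index in a dict, sorts the characters by that index in descending order, and keeps the top three.
import Mathlib
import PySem

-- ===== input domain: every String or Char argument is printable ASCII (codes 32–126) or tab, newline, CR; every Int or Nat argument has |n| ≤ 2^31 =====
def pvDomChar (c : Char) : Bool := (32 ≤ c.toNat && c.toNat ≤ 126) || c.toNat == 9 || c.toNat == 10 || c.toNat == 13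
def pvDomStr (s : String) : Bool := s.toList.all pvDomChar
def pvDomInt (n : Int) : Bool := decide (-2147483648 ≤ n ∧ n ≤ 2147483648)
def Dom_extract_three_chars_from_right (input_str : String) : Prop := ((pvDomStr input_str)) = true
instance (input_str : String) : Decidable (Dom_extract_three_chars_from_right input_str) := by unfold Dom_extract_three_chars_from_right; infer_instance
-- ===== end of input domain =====

-- B replaces A's reversed scan with an early break by a forward pass recording each
-- character's last-occurrence index, then a sort by recency (descending) and a [:3] prefix.

-- ===== PORT A =====
-- the loop: walk the reversed characters, append unseen ones, break at length 3
def pvGoA : List Char → List Char → List Char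
  | [], acc => acc
  | c :: rest, acc =>
    let acc' := if c ∈ acc then acc else acc ++ [c]
    if acc'.length = 3 then acc' else pvGoA rest acc'

def extract_three_chars_from_right (input_str : String) : String :=
  String.ofList (pvGoA input_str.toList.reverse [])

-- ===== PORT B =====
-- last_index = {}; for i, ch in enumerate(input_str): last_index[ch] = i
def pvLastIndex (l : List Char) : PySem.Dict Char Int :=
  (PySem.List.enumerate l 0).foldl (fun d p => d.insert p.2 p.1) PySem.Dict.empty

def extract_three_chars_from_right_alt (input_str : String) : String :=
  let top := PySem.List.slice
    (PySem.List.sorted (pvLastIndex input_str.toList).items (fun kv => kv.2) true)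
    none (some 3)
  String.ofList (top.map (fun kv => kv.1))

-- ===== PRECONDITION & SPEC =====
def Spec_extract_three_chars_from_right (input_str : String) (out : String) : Prop := out = extract_three_chars_from_right_alt input_str
instance (input_str : String) (out : String) : Decidable (Spec_extract_three_chars_from_right input_str out) := by unfold Spec_extract_three_chars_from_right; infer_instance

-- ===== CLAIM (what is proved, stated in full; the proofs are below) =====
def Claim_equal_extract_three_chars_from_right : Prop := ∀ (input_str : String), Dom_extract_three_chars_from_right input_str → Spec_extract_three_chars_from_right input_str (extract_three_chars_from_right input_str)

-- ===== LEMMAS AND PROOFS =====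

-- last-occurrence index of c in l (meaningful when c ∈ l)
def pvLidx : List Char → Char → Int
  | [], _ => 0
  | _ :: tl, c => if c ∈ tl then 1 + pvLidx tl c else 0

-- ---- A-side: the break-at-3 loop is the 3-prefix of the ordered dedup of the reversed list ----

-- PySem.Set.add only ever appends, so the accumulator is a prefix of any later fold state
lemma pv_prefix_foldl_add (xs : List Char) : ∀ (acc : List Char),
    acc <+: List.foldl PySem.Set.add acc xs := by
  induction xs with
  | nil => intro acc; simp
  | cons c tl ih =>
    intro acc
    refine List.IsPrefix.trans ?_ (ih (PySem.Set.add acc c))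
    simp only [PySem.Set.add]
    split <;> simp

-- A's one step equals PySem.Set.add
lemma pv_step_eq (acc : List Char) (c : Char) :
    (if c ∈ acc then acc else acc ++ [c]) = PySem.Set.add acc c := by
  simp [PySem.Set.add]

-- the loop with break-at-3 computes the 3-prefix of the full dedup fold
lemma pv_goA_eq (xs : List Char) : ∀ (acc : List Char), acc.length < 3 →
    pvGoA xs acc = (List.foldl PySem.Set.add acc xs).take 3 := by
  induction xs with
  | nil =>
    intro acc h
    simp [pvGoA, List.take_of_length_le (by omega : acc.length ≤ 3)]
  | cons c tl ih =>
    intro acc h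
    simp only [pvGoA, pv_step_eq, List.foldl_cons]
    by_cases h3 : (PySem.Set.add acc c).length = 3
    · simp only [h3, if_true]
      obtain ⟨t, ht⟩ := pv_prefix_foldl_add tl (PySem.Set.add acc c)
      rw [← ht, List.take_append_of_le_length (by omega),
        List.take_of_length_le (by omega)]
    · have hlt : (PySem.Set.add acc c).length < 3 := by
        have : (PySem.Set.add acc c).length ≤ acc.length + 1 := by
          simp only [PySem.Set.add]; split <;> simp
        omega
      simp only [if_neg h3]
      exact ih _ hlt

-- ---- dedup structure: accumulator form and first-occurrence order ----

lemma pv_foldl_add_acc (tl : List Char) : ∀ (acc : List Char),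
    List.foldl PySem.Set.add acc tl =
      acc ++ (List.foldl PySem.Set.add [] tl).filter (fun x => !acc.contains x) := by
  induction tl with
  | nil => intro acc; simp
  | cons a tl ih =>
    intro acc
    rw [List.foldl_cons, ih (PySem.Set.add acc a), List.foldl_cons,
      ih (PySem.Set.add [] a)]
    by_cases ha : a ∈ acc
    · have : PySem.Set.add acc a = acc := by simp [PySem.Set.add, ha]
      rw [this]
      congr 1
      rw [List.filter_append]
      have h1 : (PySem.Set.add [] a).filter (fun x => !acc.contains x) = [] := by
        simp [PySem.Set.add, ha]
      rw [h1, List.nil_append, List.filter_filter]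
      refine List.filter_congr (fun x hx => ?_)
      by_cases hxa : x = a
      · subst hxa; simp [ha]
      · simp [PySem.Set.add, hxa]
    · have : PySem.Set.add acc a = acc ++ [a] := by simp [PySem.Set.add, ha]
      rw [this, List.append_assoc]
      congr 1
      rw [List.filter_append]
      have h1 : (PySem.Set.add [] a).filter (fun x => !acc.contains x) = [a] := by
        simp [PySem.Set.add, ha]
      rw [h1, List.filter_filter]
      congr 1
      refine List.filter_congr (fun x hx => ?_)
      simp [PySem.Set.add, Bool.and_comm]

lemma pv_dedup_cons (a : Char) (tl : List Char) :
    PySem.List.dedup (a :: tl) = a :: (PySem.List.dedup tl).filter (fun x => x ≠ a) := by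
  show List.foldl PySem.Set.add PySem.Set.empty (a :: tl) = _
  rw [List.foldl_cons]
  have ha : PySem.Set.add PySem.Set.empty a = [a] := by simp [PySem.Set.add, PySem.Set.empty]
  rw [ha, pv_foldl_add_acc tl [a]]
  show a :: (PySem.List.dedup tl).filter _ = _
  congr 1
  refine List.filter_congr (fun x hx => ?_)
  simp [eq_comm]

-- dedup lists the distinct elements in order of FIRST occurrence
lemma pv_dedup_pairwise_idxOf : ∀ (xs : List Char),
    (PySem.List.dedup xs).Pairwise (fun a b => xs.idxOf a < xs.idxOf b) := by
  intro xs
  induction xs with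
  | nil => simp [PySem.List.dedup, PySem.Set.ofList]
  | cons a tl ih =>
    rw [pv_dedup_cons]
    constructor
    · intro b hb
      have hba : b ≠ a := by
        have := List.of_mem_filter hb
        simpa using this
      rw [List.idxOf_cons_self, List.idxOf_cons_ne _ (by simpa using hba.symm)]
      omega
    · refine List.Pairwise.imp_of_mem ?_ (List.Pairwise.filter _ ih)
      intro x y hx hy hxy
      have hxa : x ≠ a := by simpa using List.of_mem_filter hx
      have hya : y ≠ a := by simpa using List.of_mem_filter hy
      rw [List.idxOf_cons_ne _ (by simpa using hxa.symm),
        List.idxOf_cons_ne _ (by simpa using hya.symm)]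
      omega

-- ---- last-occurrence index: dict fold value and reverse-position characterisation ----

lemma pv_getD_build (l : List Char) : ∀ (s : Int) (d : PySem.Dict Char Int) (c : Char),
    ((PySem.List.enumerate l s).foldl (fun d p => d.insert p.2 p.1) d).getD c 0 =
      if c ∈ l then s + pvLidx l c else d.getD c 0 := by
  induction l with
  | nil => intro s d c; simp [PySem.List.enumerate]
  | cons a tl ih =>
    intro s d c
    rw [PySem.List.enumerate_cons, List.foldl_cons, ih (s + 1)]
    by_cases htl : c ∈ tl
    · simp [htl, pvLidx]; ring
    · by_cases hca : c = a
      · subst hca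
        simp [htl, pvLidx, PySem.Dict.getD_insert_self]
      · simp [htl, hca, PySem.Dict.getD_insert]


lemma pv_lidx_eq (l : List Char) (c : Char) (h : c ∈ l) :
    pvLidx l c = (l.length : Int) - 1 - (l.reverse.idxOf c : Nat) := by
  induction l with
  | nil => cases h
  | cons a tl ih =>
    by_cases htl : c ∈ tl
    · have hrev : c ∈ tl.reverse := by simpa using htl
      rw [List.reverse_cons, List.idxOf_append_of_mem hrev]
      have hlt := List.idxOf_lt_length_of_mem hrev
      simp only [pvLidx, htl, if_true, ih htl, List.length_cons]
      rw [List.length_reverse] at hlt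
      push_cast
      omega
    · have hca : c = a := by simpa [htl] using h
      subst hca
      have hrev : c ∉ tl.reverse := by simpa using htl
      simp [pvLidx, htl, List.idxOf_append, hrev]

-- ---- the dict's items, and B's sorted list named explicitly ----

lemma pv_keys_build (l : List Char) :
    (pvLastIndex l).keys = PySem.List.dedup l := by
  unfold pvLastIndex
  rw [PySem.Dict.keys_foldl_insert_key (PySem.List.enumerate l 0)
    (fun p => p.2) (fun _ p => p.1) PySem.Dict.empty]
  rw [PySem.Dict.keys_empty, PySem.Set.update_nil_left, PySem.List.map_snd_enumerate]
  simp

lemma pv_nodup_keys_build (l : List Char) : (pvLastIndex l).keys.Nodup := by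
  rw [pv_keys_build]; exact PySem.List.nodup_dedup l

lemma pv_items_build (l : List Char) :
    (pvLastIndex l).items = (PySem.List.dedup l).map (fun c => (c, pvLidx l c)) := by
  rw [PySem.Dict.items_eq_map_keys _ (pv_nodup_keys_build l) 0, pv_keys_build]
  refine List.map_congr_left (fun c hc => ?_)
  have hcl : c ∈ l := (PySem.List.mem_dedup l c).mp hc
  have := pv_getD_build l 0 PySem.Dict.empty c
  unfold pvLastIndex
  rw [this]
  simp [hcl]

-- B's sort names the dedup of the REVERSED list, decorated with last indices
lemma pv_sorted_eq (l : List Char) :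
    PySem.List.sorted (pvLastIndex l).items (fun kv => kv.2) true =
      (PySem.List.dedup l.reverse).map (fun c => (c, pvLidx l c)) := by
  refine PySem.List.sorted_rev_eq_of_perm_of_pairwise_gt _ _ _ ?_ ?_
  · rw [pv_items_build]
    refine List.Perm.map _ ?_
    rw [List.perm_ext_iff_of_nodup (PySem.List.nodup_dedup _) (PySem.List.nodup_dedup _)]
    intro c
    rw [PySem.List.mem_dedup, PySem.List.mem_dedup, List.mem_reverse]
  · rw [List.pairwise_map]
    refine List.Pairwise.imp_of_mem ?_ (pv_dedup_pairwise_idxOf l.reverse)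
    intro a b ha hb hab
    have hal : a ∈ l := by
      have := (PySem.List.mem_dedup _ _).mp ha; simpa using this
    have hbl : b ∈ l := by
      have := (PySem.List.mem_dedup _ _).mp hb; simpa using this
    rw [pv_lidx_eq l a hal, pv_lidx_eq l b hbl]
    have hblt := List.idxOf_lt_length_of_mem ((List.mem_reverse).mpr hbl)
    rw [List.length_reverse] at hblt
    omega

-- ===== VERDICT (by name: the statement is the Claim_ definition above) =====
theorem extract_three_chars_from_right_spec : Claim_equal_extract_three_chars_from_right := by
  intro s _
  unfold Spec_extract_three_chars_from_right extract_three_chars_from_right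
    extract_three_chars_from_right_alt
  show String.ofList (pvGoA s.toList.reverse []) =
    String.ofList ((PySem.List.slice
      (PySem.List.sorted (pvLastIndex s.toList).items (fun kv => kv.2) true)
      none (some 3)).map (fun kv => kv.1))
  rw [pv_goA_eq _ [] (by simp), pv_sorted_eq]
  have hsl : PySem.List.slice
      ((PySem.List.dedup s.toList.reverse).map (fun c => (c, pvLidx s.toList c)))
      none (some 3)
      = ((PySem.List.dedup s.toList.reverse).map (fun c => (c, pvLidx s.toList c))).take 3 := by
    simp [pysem]
  rw [hsl, List.map_take, List.map_map,
    show ((fun kv : Char × Int => kv.1) ∘ fun c => (c, pvLidx s.toList c)) = id from rfl,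
    List.map_id]
  rfl
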